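-- pv_equiv track=rewrite | github.com/EliasMessner/KuSu | src/cleanResults.py | getCleanResults
-- ===== SOURCE A (Python) =====
-- def getCleanResults(data):
--     """
--     deprecated, use get_clean_results
--     """
--     cleanResults = []
--     currentPos = 0
--     while data.find("lido:lido", currentPos) != -1:         # as long as there are any more results
--         cleanEntry = []
--
--         currentPos = data.find("lido:lido", currentPos)                                 # gives the index of the first letter
--         currentPos = data.find("lido:objectIdentificationWrap", currentPos+10)          # +11 to offset "'lido:lido'" and continue after it
--         currentPos = data.find("'#text':", currentPos+30)                               # same principle
--         startTitle = data.find("'", currentPos+8)+1                                     # the first letter of the actual title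
--         endTitle = data.find("'", startTitle)
--         title = data[startTitle:endTitle]
--         cleanEntry.append(f"'title':'{title}',\n")                                      # JSON as 'title':'foobar' pattern, to be combined later
--
--         currentPos = data.find("lido:eventActor", currentPos)                           # can be extended by any tag with adjusted tags
--         currentPos = data.find("lido:displayActorInRole", currentPos+16)                # must be in the same order as in the file though
--         startActor = data.find("'", currentPos+25)+1
--         endActor = data.find("'", startActor)
--         actor = data[startActor:endActor]
--         cleanEntry.append(f"'actor':'{actor}',\n")
--
--         currentPos = data.find("lido:recordInfoSet", currentPos)
--         currentPos = data.find("lido:recordInfoLink", currentPos+19)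
--         startURL = data.find("'", currentPos+20)+1
--         endURL = data.find("'", startURL)
--         URL = data[startURL:endURL]
--         cleanEntry.append(f"'URL':'{URL}'\n")                                           # no final comma here to comply with valid JSON structure!
--
--         cleanResults.append(cleanEntry)
--
--
--     output = "{"                                                # generate the complete JSON file from scratch
--     for i in range(len(cleanResults)):
--         output += "'result" + str(i) + "':\n {"                 # {'result0':{...}, 'result1':{...}, 'result2':{...}}
--
--         for item in cleanResults[i]:                            # equates to further 'key':'value' pairs being added within the { }
--             output += "\t" + item
--
--         if i == len(cleanResults)-1:                            # no comma separator after the last result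
--             output += "}\n"
--         else:
--             output += "},\n"                                    # add comma separator between results only
--     output += "}"
--
--     return output
-- ===== SOURCE B (Python) =====
-- def getCleanResults(data):
--     blocks = []
--     pos = 0
--     while data.find("lido:lido", pos) != -1:
--         pos = data.find("lido:lido", pos)
--         pos = data.find("lido:objectIdentificationWrap", pos + 10)
--         pos = data.find("'#text':", pos + 30)
--         startTitle = data.find("'", pos + 8) + 1
--         title = data[startTitle:data.find("'", startTitle)]
--         pos = data.find("lido:eventActor", pos)
--         pos = data.find("lido:displayActorInRole", pos + 16)
--         startActor = data.find("'", pos + 25) + 1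
--         actor = data[startActor:data.find("'", startActor)]
--         pos = data.find("lido:recordInfoSet", pos)
--         pos = data.find("lido:recordInfoLink", pos + 19)
--         startURL = data.find("'", pos + 20) + 1
--         URL = data[startURL:data.find("'", startURL)]
--         blocks.append("'result" + str(len(blocks)) + "':\n {\t'title':'" + title
--                       + "',\n\t'actor':'" + actor + "',\n\t'URL':'" + URL + "'\n}")
--     if not blocks:
--         return "{}"
--     return "{" + ",\n".join(blocks) + "\n}"
-- ===== Notes on version B (the rewrite author's own statement) =====
-- stated objective: simpler
-- what changed: B fuses A's two phases into a single scan that formats each record as one complete block string as it is parsed and finally joins the blocks with ',\n', eliminating A's intermediate list-of-fragment-lists and its second indexed loop with the last-element comma test.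
import Mathlib
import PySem

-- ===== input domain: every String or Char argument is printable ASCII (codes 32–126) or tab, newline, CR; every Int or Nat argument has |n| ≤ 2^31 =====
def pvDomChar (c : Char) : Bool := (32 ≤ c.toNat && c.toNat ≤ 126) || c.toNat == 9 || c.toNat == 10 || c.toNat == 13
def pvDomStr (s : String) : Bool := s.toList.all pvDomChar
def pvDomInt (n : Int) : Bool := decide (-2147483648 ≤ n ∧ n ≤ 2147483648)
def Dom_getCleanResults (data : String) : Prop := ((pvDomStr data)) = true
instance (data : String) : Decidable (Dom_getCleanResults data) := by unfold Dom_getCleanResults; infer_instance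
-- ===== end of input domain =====

-- B fuses A's two phases into one scan: each record is formatted as one block string while
-- it is parsed, and the result is a single join — the fragment-list intermediate and the
-- second indexed comma loop of A disappear (objective: simpler).

-- ===== PORT A =====
-- the while loop of A: fuel makes the same computation total (on inputs admitted by Pre_
-- the Python loop's scan position strictly advances, so data.length + 1 rounds cover it);
-- state = (currentPos, cleanResults)
def getCleanResultsLoop (data : List Char) : Nat → Int → List (List (List Char)) → List (List (List Char))
  | 0, _, cleanResults => cleanResults
  | fuel + 1, currentPos0, cleanResults =>
    if PySem.Chars.findFrom data "lido:lido".toList currentPos0 = -1 then cleanResults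
    else
      let currentPos := PySem.Chars.findFrom data "lido:lido".toList currentPos0
      let currentPos := PySem.Chars.findFrom data "lido:objectIdentificationWrap".toList (currentPos + 10)
      let currentPos := PySem.Chars.findFrom data "'#text':".toList (currentPos + 30)
      let startTitle := PySem.Chars.findFrom data "'".toList (currentPos + 8) + 1
      let endTitle := PySem.Chars.findFrom data "'".toList startTitle
      let title := PySem.Chars.slice data (some startTitle) (some endTitle)
      let cleanEntry : List (List Char) := []
      let cleanEntry := cleanEntry ++ ["'title':'".toList ++ title ++ "',\n".toList]
      let currentPos := PySem.Chars.findFrom data "lido:eventActor".toList currentPos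
      let currentPos := PySem.Chars.findFrom data "lido:displayActorInRole".toList (currentPos + 16)
      let startActor := PySem.Chars.findFrom data "'".toList (currentPos + 25) + 1
      let endActor := PySem.Chars.findFrom data "'".toList startActor
      let actor := PySem.Chars.slice data (some startActor) (some endActor)
      let cleanEntry := cleanEntry ++ ["'actor':'".toList ++ actor ++ "',\n".toList]
      let currentPos := PySem.Chars.findFrom data "lido:recordInfoSet".toList currentPos
      let currentPos := PySem.Chars.findFrom data "lido:recordInfoLink".toList (currentPos + 19)
      let startURL := PySem.Chars.findFrom data "'".toList (currentPos + 20) + 1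
      let endURL := PySem.Chars.findFrom data "'".toList startURL
      let URL := PySem.Chars.slice data (some startURL) (some endURL)
      let cleanEntry := cleanEntry ++ ["'URL':'".toList ++ URL ++ "'\n".toList]
      getCleanResultsLoop data fuel currentPos (cleanResults ++ [cleanEntry])

def getCleanResults (data : String) : String :=
  let cleanResults := getCleanResultsLoop data.toList (data.toList.length + 1) 0 []
  let output := (List.range cleanResults.length).foldl (fun (output : List Char) (i : Nat) =>
      let output := output ++ "'result".toList ++ PySem.Int.toChars (i : Int) ++ "':\n {".toList
      let output := (cleanResults.getD i []).foldl (fun output item => output ++ "\t".toList ++ item) output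
      if i = cleanResults.length - 1 then output ++ "}\n".toList else output ++ "},\n".toList)
    "{".toList
  String.ofList (output ++ "}".toList)

-- ===== PORT B =====
-- Source B's single loop: parse exactly as A does, but append one fully formatted block per record
def getCleanResultsAltLoop (data : List Char) : Nat → Int → List (List Char) → List (List Char)
  | 0, _, blocks => blocks
  | fuel + 1, pos0, blocks =>
    if PySem.Chars.findFrom data "lido:lido".toList pos0 = -1 then blocks
    else
      let pos := PySem.Chars.findFrom data "lido:lido".toList pos0
      let pos := PySem.Chars.findFrom data "lido:objectIdentificationWrap".toList (pos + 10)
      let pos := PySem.Chars.findFrom data "'#text':".toList (pos + 30)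
      let startTitle := PySem.Chars.findFrom data "'".toList (pos + 8) + 1
      let title := PySem.Chars.slice data (some startTitle) (some (PySem.Chars.findFrom data "'".toList startTitle))
      let pos := PySem.Chars.findFrom data "lido:eventActor".toList pos
      let pos := PySem.Chars.findFrom data "lido:displayActorInRole".toList (pos + 16)
      let startActor := PySem.Chars.findFrom data "'".toList (pos + 25) + 1
      let actor := PySem.Chars.slice data (some startActor) (some (PySem.Chars.findFrom data "'".toList startActor))
      let pos := PySem.Chars.findFrom data "lido:recordInfoSet".toList pos
      let pos := PySem.Chars.findFrom data "lido:recordInfoLink".toList (pos + 19)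
      let startURL := PySem.Chars.findFrom data "'".toList (pos + 20) + 1
      let URL := PySem.Chars.slice data (some startURL) (some (PySem.Chars.findFrom data "'".toList startURL))
      let block := "'result".toList ++ PySem.Int.toChars (blocks.length : Int) ++ "':\n {\t'title':'".toList
                   ++ title ++ "',\n\t'actor':'".toList ++ actor ++ "',\n\t'URL':'".toList ++ URL ++ "'\n}".toList
      getCleanResultsAltLoop data fuel pos (blocks ++ [block])

def getCleanResults_alt (data : String) : String :=
  let blocks := getCleanResultsAltLoop data.toList (data.toList.length + 1) 0 []
  if blocks = [] then String.ofList "{}".toList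
  else String.ofList ("{".toList ++ PySem.Chars.join ",\n".toList blocks ++ "\n}".toList)

-- ===== PRECONDITION & SPEC =====
-- the chained tag search A performs after locating "lido:lido" at p (only the finds that
-- feed currentPos; the quote searches never do)
def pvChainEnd (data : List Char) (p : Int) : Int :=
  let c := PySem.Chars.findFrom data "lido:objectIdentificationWrap".toList (p + 10)
  let c := PySem.Chars.findFrom data "'#text':".toList (c + 30)
  let c := PySem.Chars.findFrom data "lido:eventActor".toList c
  let c := PySem.Chars.findFrom data "lido:displayActorInRole".toList (c + 16)
  let c := PySem.Chars.findFrom data "lido:recordInfoSet".toList c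
  PySem.Chars.findFrom data "lido:recordInfoLink".toList (c + 19)

-- Pre_ excludes inputs on which A's while loop never terminates: whenever the chained tag
-- search after some "lido:lido" occurrence lands at or before that occurrence, A re-finds
-- the same occurrence forever (B's loop is the same scan, so it diverges there too).
-- The ports agree on all inputs (both use the same fuel), so the proof below does not need
-- this hypothesis; Pre_ is stated because divergent inputs have no Python value to claim.
def Pre_getCleanResults (data : String) : Prop :=
  ∀ p ∈ List.range data.toList.length,
    "lido:lido".toList <+: data.toList.drop p →
    (pvChainEnd data.toList p = -1 ∨ (p : Int) < pvChainEnd data.toList p)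
instance (data : String) : Decidable (Pre_getCleanResults data) := by unfold Pre_getCleanResults; infer_instance

def pvWitness_getCleanResults : String := "lido:lido xx"

def Spec_getCleanResults (data : String) (out : String) : Prop := out = getCleanResults_alt data
instance (data : String) (out : String) : Decidable (Spec_getCleanResults data out) := by unfold Spec_getCleanResults; infer_instance

-- ===== CLAIM (what is proved, stated in full; the proofs are below) =====
def Claim_equal_getCleanResults : Prop := ∀ (data : String), Dom_getCleanResults data → Pre_getCleanResults data → Spec_getCleanResults data (getCleanResults data)

-- ===== LEMMAS AND PROOFS =====

-- one formatted result block, without its closing brace (shared shape of both outputs)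
def pvBlockOf (i : Nat) (e : List (List Char)) : List Char :=
  "'result".toList ++ PySem.Int.toChars (i : Int) ++ "':\n {".toList
    ++ e.flatMap (fun item => "\t".toList ++ item)

-- what A's rendering phase emits for the entries `tail`, the first carrying index i
def pvRend : Nat → List (List (List Char)) → List Char
  | _, [] => []
  | i, e :: rest => pvBlockOf i e ++ (if rest = [] then "}\n".toList else "},\n".toList) ++ pvRend (i + 1) rest

-- B's block strings for the entries `tail`, numbering from i
def pvBlocks : Nat → List (List (List Char)) → List (List Char)
  | _, [] => []
  | i, e :: rest => (pvBlockOf i e ++ "}".toList) :: pvBlocks (i + 1) rest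

lemma pv_block_eq (k : Nat) (t a u : List Char) :
    "'result".toList ++ PySem.Int.toChars (k : Int) ++ "':\n {\t'title':'".toList
      ++ t ++ "',\n\t'actor':'".toList ++ a ++ "',\n\t'URL':'".toList ++ u ++ "'\n}".toList
    = pvBlockOf k (([] : List (List Char)) ++ ["'title':'".toList ++ t ++ "',\n".toList]
        ++ ["'actor':'".toList ++ a ++ "',\n".toList] ++ ["'URL':'".toList ++ u ++ "'\n".toList])
      ++ "}".toList := by
  have h1 : "':\n {\t'title':'".toList = "':\n {".toList ++ "\t".toList ++ "'title':'".toList := rfl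
  have h2 : "',\n\t'actor':'".toList = "',\n".toList ++ "\t".toList ++ "'actor':'".toList := rfl
  have h3 : "',\n\t'URL':'".toList = "',\n".toList ++ "\t".toList ++ "'URL':'".toList := rfl
  have h4 : "'\n}".toList = "'\n".toList ++ "}".toList := rfl
  simp [pvBlockOf, h1, h2, h3, h4]

lemma pv_loop_rel (data : List Char) : ∀ (fuel : Nat) (cur : Int)
    (accA : List (List (List Char))) (accB : List (List Char)),
    ∃ new, getCleanResultsLoop data fuel cur accA = accA ++ new ∧
      getCleanResultsAltLoop data fuel cur accB = accB ++ pvBlocks accB.length new := by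
  intro fuel
  induction fuel with
  | zero =>
    intro cur accA accB
    exact ⟨[], by simp [getCleanResultsLoop], by simp [getCleanResultsAltLoop, pvBlocks]⟩
  | succ fuel ih =>
    intro cur accA accB
    by_cases hf : PySem.Chars.findFrom data "lido:lido".toList cur = -1
    · refine ⟨[], ?_, ?_⟩
      · simp only [getCleanResultsLoop]
        rw [if_pos hf]
        simp
      · simp only [getCleanResultsAltLoop]
        rw [if_pos hf]
        simp [pvBlocks]
    · have key : ∀ (C : Int) (E : List (List Char)) (Bk : List Char),
          Bk = pvBlockOf accB.length E ++ "}".toList →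
          ∃ new, getCleanResultsLoop data fuel C (accA ++ [E]) = accA ++ new ∧
            getCleanResultsAltLoop data fuel C (accB ++ [Bk]) = accB ++ pvBlocks accB.length new := by
        intro C E Bk hBk
        obtain ⟨new, n1, n2⟩ := ih C (accA ++ [E]) (accB ++ [Bk])
        refine ⟨E :: new, by simpa using n1, ?_⟩
        rw [n2]
        simp [pvBlocks, hBk]
      simp only [getCleanResultsLoop, getCleanResultsAltLoop]
      rw [if_neg hf, if_neg hf]
      exact key _ _ _ (pv_block_eq accB.length _ _ _)

lemma pv_render_eq (full : List (List (List Char))) : ∀ (tail : List (List (List Char))) (i : Nat) (s : List Char),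
    i + tail.length = full.length → full.drop i = tail →
    (List.range' i tail.length).foldl (fun (output : List Char) (i : Nat) =>
        let output := output ++ "'result".toList ++ PySem.Int.toChars (i : Int) ++ "':\n {".toList
        let output := (full.getD i []).foldl (fun output item => output ++ "\t".toList ++ item) output
        if i = full.length - 1 then output ++ "}\n".toList else output ++ "},\n".toList) s
    = s ++ pvRend i tail := by
  intro tail
  induction tail with
  | nil => intro i s h1 h2; simp [pvRend]
  | cons e rest ih =>
    intro i s h1 h2
    have h0 : full[i]? = some e := by
      have hd := List.getElem?_drop (xs := full) (i := i) (j := 0)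
      rw [h2] at hd
      simpa using hd.symm
    have hget : full.getD i [] = e := by simp [List.getD_eq_getElem?_getD, h0]
    have hdrop : full.drop (i + 1) = rest := by
      have ht := List.tail_drop (l := full) (i := i)
      rw [h2] at ht
      simpa using ht.symm
    rw [List.length_cons, List.range'_succ, List.foldl_cons]
    cases rest with
    | nil =>
      have hif : i = full.length - 1 := by simp at h1; omega
      rw [hif] at h0
      simp [h0, hif, pvRend, pvBlockOf, List.append_assoc, List.flatMap_def]
    | cons e2 rest2 =>
      have hif : ¬ i = full.length - 1 := by simp at h1; omega
      have h1' : (i + 1) + (e2 :: rest2).length = full.length := by simp at h1 ⊢; omega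
      rw [ih (i + 1) _ h1' hdrop]
      simp [h0, hif, pvRend, pvBlockOf, List.append_assoc, List.flatMap_def]

lemma pv_join_eq : ∀ (tail : List (List (List Char))) (i : Nat), tail ≠ [] →
    PySem.Chars.join ",\n".toList (pvBlocks i tail) ++ "\n".toList = pvRend i tail := by
  intro tail
  induction tail with
  | nil => intro i h; exact absurd rfl h
  | cons e rest ih =>
    intro i _
    cases rest with
    | nil =>
      simp only [pvBlocks, pvRend, PySem.Chars.join_singleton]
      have h : "}".toList ++ "\n".toList = ("}\n".toList : List Char) := rfl
      simp [← h]
    | cons e2 rest2 =>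
      have hne : (e2 :: rest2 : List (List (List Char))) ≠ [] := by simp
      have ih' := ih (i + 1) hne
      have h2 : ("},\n".toList : List Char) = "}".toList ++ ",\n".toList := rfl
      simp only [pvBlocks, pvRend, if_neg hne] at ih' ⊢
      rw [PySem.Chars.join_cons_cons]
      simp only [List.append_assoc, h2]
      rw [← List.append_assoc _ _ (pvRend (i + 1 + 1) rest2), ← List.append_assoc, ih']
      simp [List.append_assoc, h2]

-- ===== VERDICT (by name: the statement is the Claim_ definition above) =====
theorem getCleanResults_spec : Claim_equal_getCleanResults := by
  intro data _ _
  unfold Spec_getCleanResults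
  simp only [getCleanResults, getCleanResults_alt]
  obtain ⟨new, hA, hB⟩ := pv_loop_rel data.toList (data.toList.length + 1) 0 [] []
  simp only [List.nil_append, List.length_nil] at hA hB
  rw [hA, hB]
  have hr := pv_render_eq new new 0 "{".toList (by simp) (by simp)
  rw [List.range_eq_range', hr]
  cases new with
  | nil => simp [pvBlocks, pvRend]
  | cons e rest =>
    have hne : pvBlocks 0 (e :: rest) ≠ [] := by simp [pvBlocks]
    rw [if_neg hne, ← pv_join_eq (e :: rest) 0 (by simp)]
    have h5 : ("\n}".toList : List Char) = "\n".toList ++ "}".toList := rfl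
    simp [h5, List.append_assoc]
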